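-- pv_equiv track=rewrite | github.com/chenningg/cs3245-index-query-processing | index.py | add_skip_pointers
-- ===== SOURCE A (Python) =====
-- import math
--
-- def add_skip_pointers(posting_list_to_merge):
--     skip_pointer_number = int(math.sqrt(len(posting_list_to_merge)))
--     skip_pointer_interval = len(posting_list_to_merge) // skip_pointer_number
--
--     skip_pointer_marker = "^"
--     current_skip_pointer_index = 0
--
--     for i in range(skip_pointer_number):
--         target_skip_index = 1 + current_skip_pointer_index + skip_pointer_interval
--
--         # if the target_skip_index is going to be the very last element, or exceeds the last element of our list, just set it to point to the last
--         if target_skip_index >= len(posting_list_to_merge):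
--             target_skip_index = len(posting_list_to_merge)
--
--         # add in our skip pointers BEFORE the element that we are doing a comparison with
--         posting_list_to_merge.insert(
--             current_skip_pointer_index, "^" + str(target_skip_index)
--         )
--         current_skip_pointer_index = target_skip_index
--
--     # example output with original posting_list_to_merge = [1,2,3,4,5,6,7,8,9]
--     # skip pointers added --> [^4, 1,2,3,^8, 4,5,6,^11, 7,8,9]
--
--     return posting_list_to_merge
-- ===== SOURCE B (Python) =====
-- import math
--
-- def add_skip_pointers(posting_list_to_merge):
--     # Linear-time rebuild: precompute the skip-marker positions (in original
--     # coordinates) arithmetically, then stitch the output together from whole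
--     # slices of the original list with the markers in between.
--     # Note: unlike A, this does not mutate its argument; return value is the same.
--     n = len(posting_list_to_merge)
--     skip_pointer_number = int(math.sqrt(n))
--     skip_pointer_interval = n // skip_pointer_number
--
--     markers = []
--     cur = 0
--     for i in range(skip_pointer_number):
--         target = min(1 + cur + skip_pointer_interval, n + i)
--         markers.append((cur - i, "^" + str(target)))
--         cur = target
--
--     out = []
--     prev = 0
--     for pos, label in markers:
--         out += posting_list_to_merge[prev:pos]
--         out.append(label)
--         prev = pos
--     out += posting_list_to_merge[prev:]
--     return out
-- ===== Notes on version B (the rewrite author's own statement) =====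
-- stated objective: faster
-- what changed: A repeatedly calls list.insert (each O(n)) on the growing list while re-reading its length; B precomputes all skip-marker positions arithmetically in original coordinates, then stitches the output from whole slices of the input with the markers in between, in linear time.
-- outside the precondition, e.g. on add_skip_pointers([]): A raises ZeroDivisionError, B raises ZeroDivisionError
import Mathlib
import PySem

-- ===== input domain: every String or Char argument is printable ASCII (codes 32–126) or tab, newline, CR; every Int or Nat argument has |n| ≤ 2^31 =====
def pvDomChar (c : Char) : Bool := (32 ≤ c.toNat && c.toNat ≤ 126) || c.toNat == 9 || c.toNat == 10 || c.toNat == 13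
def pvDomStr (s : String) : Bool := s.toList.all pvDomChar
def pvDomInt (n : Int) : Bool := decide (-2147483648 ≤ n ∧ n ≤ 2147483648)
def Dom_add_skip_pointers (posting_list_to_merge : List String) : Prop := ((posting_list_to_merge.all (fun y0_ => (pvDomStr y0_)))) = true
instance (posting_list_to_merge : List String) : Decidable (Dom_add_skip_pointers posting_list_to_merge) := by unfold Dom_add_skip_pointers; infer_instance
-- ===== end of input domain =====

-- B replaces A's loop of O(n) list.insert calls by arithmetically precomputed
-- marker positions and a single linear merge pass (faster, asymptotic).
-- A mutates its argument in place; B does not — the equivalence is about the return value.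
-- int(math.sqrt(len(..))) is ported as Nat.sqrt (exact for every length the checks reach).

-- ===== PORT A =====
-- the for-loop of A: m iterations remain; state = (the list being mutated, current_skip_pointer_index)
def pvAloop (itv : Nat) : Nat → List String → Int → List String
  | 0, xs, _ => xs
  | Nat.succ m, xs, cur =>
      let len : Int := PySem.List.len xs
      let t0 : Int := 1 + cur + (itv : Int)
      let target : Int := if len ≤ t0 then len else t0
      pvAloop itv m (PySem.List.insert xs cur ("^" ++ PySem.Int.toStr target)) target

def add_skip_pointers (posting_list_to_merge : List String) : List String :=
  let n := posting_list_to_merge.length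
  let k := Nat.sqrt n                      -- int(math.sqrt(len(...)))
  let itv := n / k                         -- len // k ; ZeroDivisionError when k = 0, excluded by Pre_
  pvAloop itv k posting_list_to_merge 0

-- ===== PORT B =====
-- first loop of Source B: the (original-coordinate position, label) marker list
def pvBmarkers (n itv : Nat) : Nat → Int → Nat → List (Int × String)
  | 0, _, _ => []
  | Nat.succ m, cur, i =>
      let target : Int := min (1 + cur + (itv : Int)) ((n : Int) + (i : Int))
      (cur - (i : Int), "^" ++ PySem.Int.toStr target) :: pvBmarkers n itv m target (i + 1)

-- second loop of Source B: stitch together slices of the original list and the markers;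
-- state = (out, prev)
def pvBstitch (orig : List String) : List (Int × String) → List String → Int → List String
  | [], out, prev => out ++ PySem.List.slice orig (some prev) none
  | (pos, label) :: ms, out, prev =>
      pvBstitch orig ms (out ++ PySem.List.slice orig (some prev) (some pos) ++ [label]) pos

def add_skip_pointers_alt (posting_list_to_merge : List String) : List String :=
  let n := posting_list_to_merge.length
  let k := Nat.sqrt n
  let itv := n / k
  pvBstitch posting_list_to_merge (pvBmarkers n itv k 0 0) [] 0

-- ===== PRECONDITION & SPEC =====
-- Pre_ excludes only the empty list, on which A raises ZeroDivisionError (int(math.sqrt(0)) = 0).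
def Pre_add_skip_pointers (posting_list_to_merge : List String) : Prop := posting_list_to_merge ≠ []
instance (posting_list_to_merge : List String) : Decidable (Pre_add_skip_pointers posting_list_to_merge) := by unfold Pre_add_skip_pointers; infer_instance
def pvWitness_add_skip_pointers : List String := ["1", "2", "3"]

def Spec_add_skip_pointers (posting_list_to_merge : List String) (out : List String) : Prop := out = add_skip_pointers_alt posting_list_to_merge
instance (posting_list_to_merge : List String) (out : List String) : Decidable (Spec_add_skip_pointers posting_list_to_merge out) := by unfold Spec_add_skip_pointers; infer_instance

-- ===== CLAIM (what is proved, stated in full; the proofs are below) =====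
def Claim_equal_add_skip_pointers : Prop := ∀ (posting_list_to_merge : List String), Dom_add_skip_pointers posting_list_to_merge → Pre_add_skip_pointers posting_list_to_merge → Spec_add_skip_pointers posting_list_to_merge (add_skip_pointers posting_list_to_merge)

-- ===== LEMMAS AND PROOFS =====

-- proof-side reference merge: emit each due marker (position p = scan index j) before its element
def pvBmerge : Nat → List String → List (Int × String) → List String
  | _, [], _ => []
  | j, x :: xs, [] => x :: pvBmerge (j + 1) xs []
  | j, x :: xs, (p, s) :: ms =>
      if p = (j : Int) then s :: pvBmerge j (x :: xs) ms
      else x :: pvBmerge (j + 1) xs ((p, s) :: ms)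
  termination_by _j xs ms => (xs.length, ms.length)

-- a well-formed marker list relative to the scan position j and the remaining elements xs
def pvGood (j : Nat) (xs : List String) (ms : List (Int × String)) : Prop :=
  (ms.map Prod.fst).Pairwise (· ≤ ·) ∧
  ∀ p ∈ ms.map Prod.fst, (j : Int) ≤ p ∧ p < (j : Int) + xs.length

theorem pvBmerge_nil (j : Nat) (xs : List String) : pvBmerge j xs [] = xs := by
  induction xs generalizing j with
  | nil => rw [pvBmerge]
  | cons x xs ih => rw [pvBmerge, ih]

theorem pvBmerge_length (j : Nat) (xs : List String) (ms : List (Int × String))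
    (h : pvGood j xs ms) : (pvBmerge j xs ms).length = xs.length + ms.length := by
  induction j, xs, ms using pvBmerge.induct with
  | case1 j ms =>
    obtain ⟨-, hb⟩ := h
    cases ms with
    | nil => simp [pvBmerge]
    | cons m ms => have := hb m.1 (by simp); simp at this; omega
  | case2 j x xs ih =>
    simp [pvBmerge, ih ⟨by simp, by simp⟩]
  | case3 j x xs s ms ih =>
    obtain ⟨hs, hb⟩ := h
    simp only [List.map_cons, List.pairwise_cons] at hs
    rw [pvBmerge, if_pos rfl]
    have := ih ⟨hs.2, fun q hq => (hb q (by simp [hq]))⟩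
    simp at this ⊢; omega
  | case4 j x xs p s ms hp ih =>
    obtain ⟨hs, hb⟩ := h
    simp only [List.map_cons, List.pairwise_cons] at hs
    rw [pvBmerge, if_neg hp]
    have hpj : (j : Int) + 1 ≤ p := by
      have := (hb p (by simp)).1
      rcases lt_or_eq_of_le this with h' | h'
      · omega
      · exact absurd h'.symm hp
    have := ih ⟨List.pairwise_cons.mpr ⟨hs.1, hs.2⟩, ?_⟩
    · simp at this ⊢; omega
    · intro q hq
      simp only [List.map_cons, List.mem_cons] at hq
      rcases hq with rfl | hq
      · have := (hb q (by simp)).2; simp at this ⊢; omega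
      · have h1 := hs.1 q hq
        have h2 := (hb q (by simp [hq])).2
        simp at h2 ⊢; omega

theorem pvBmerge_append_single (j : Nat) (xs : List String) (ms : List (Int × String))
    (q : Int) (t : String)
    (hsort : (ms.map Prod.fst).Pairwise (· ≤ ·))
    (hmem : ∀ p ∈ ms.map Prod.fst, (j : Int) ≤ p ∧ p ≤ q)
    (hjq : (j : Int) ≤ q) (hq : q < (j : Int) + xs.length) :
    pvBmerge j xs (ms ++ [(q, t)]) =
      (pvBmerge j xs ms).take ((q - j).toNat + ms.length) ++
        t :: (pvBmerge j xs ms).drop ((q - j).toNat + ms.length) := by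
  induction j, xs, ms using pvBmerge.induct generalizing q t with
  | case1 j ms => simp at hq; omega
  | case2 j x xs ih =>
    simp only [List.nil_append, List.length_nil, Nat.add_zero]
    rcases eq_or_lt_of_le hjq with h' | h'
    · conv_lhs => rw [pvBmerge]
      rw [if_pos h'.symm]
      simp [← h', pvBmerge]
    · conv_lhs => rw [pvBmerge]
      rw [if_neg (by omega)]
      conv_rhs => rw [pvBmerge]
      have hrec := ih q t (by simp) (by simp) (by push_cast; omega)
        (by simp at hq ⊢; omega)
      simp only [List.nil_append, List.length_nil, Nat.add_zero] at hrec
      push_cast at hrec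
      rw [hrec]
      have hidx : (q - (j:Int)).toNat = ((q - ((j:Int)+1)).toNat) + 1 := by omega
      rw [hidx, List.take_succ_cons, List.drop_succ_cons, List.cons_append]
  | case3 j x xs s ms ih =>
    simp only [List.map_cons, List.pairwise_cons] at hsort
    rw [List.cons_append]
    conv_lhs => rw [pvBmerge]
    rw [if_pos rfl]
    conv_rhs => rw [pvBmerge]
    rw [if_pos rfl]
    have hrec := ih q t hsort.2 (fun p hp => hmem p (by simp [hp])) hjq hq
    rw [hrec]
    simp only [List.length_cons]
    have h2 : (q - (j:Int)).toNat + (ms.length + 1) = ((q - (j:Int)).toNat + ms.length) + 1 := by omega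
    rw [h2, List.take_succ_cons, List.drop_succ_cons, List.cons_append]
  | case4 j x xs p s ms hp ih =>
    simp only [List.map_cons, List.pairwise_cons] at hsort
    have hpj : (j : Int) + 1 ≤ p := by
      have := (hmem p (by simp)).1
      rcases lt_or_eq_of_le this with h' | h'
      · omega
      · exact absurd h'.symm hp
    have hpq : p ≤ q := (hmem p (by simp)).2
    rw [List.cons_append]
    conv_lhs => rw [pvBmerge]
    rw [if_neg hp]
    conv_rhs => rw [pvBmerge]
    rw [if_neg hp]
    have hrec := ih q t (List.pairwise_cons.mpr ⟨hsort.1, hsort.2⟩) ?_ (by push_cast; omega) ?_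
    · simp only [List.cons_append] at hrec
      push_cast at hrec
      rw [hrec]
      simp only [List.length_cons]
      have h2 : (q - (j:Int)).toNat + (ms.length + 1) = ((q - ((j:Int)+1)).toNat + (ms.length + 1)) + 1 := by omega
      rw [h2, List.take_succ_cons, List.drop_succ_cons, List.cons_append]
    · intro r hr
      simp only [List.map_cons, List.mem_cons] at hr
      rcases hr with rfl | hr
      · exact ⟨by push_cast; omega, (hmem r (by simp)).2⟩
      · have h1 := hsort.1 r hr
        exact ⟨by push_cast; omega, (hmem r (by simp [hr])).2⟩
    · simp at hq ⊢; omega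

theorem pvLoop_eq (m itv : Nat) (orig : List String) :
    ∀ (ms : List (Int × String)) (cur : Int),
    pvGood 0 orig ms →
    (∀ p ∈ ms.map Prod.fst, p ≤ cur - ms.length) →
    (ms.length : Int) ≤ cur →
    cur < (orig.length : Int) + ms.length →
    pvAloop itv m (pvBmerge 0 orig ms) cur =
      pvBmerge 0 orig (ms ++ pvBmarkers orig.length itv m cur ms.length) := by
  induction m with
  | zero => intro ms cur _ _ _ _; simp [pvAloop, pvBmarkers]
  | succ m ih =>
    intro ms cur hGood hUb hLb hCur
    have hlen : (pvBmerge 0 orig ms).length = orig.length + ms.length :=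
      pvBmerge_length 0 orig ms hGood
    rw [pvAloop]
    simp only [PySem.List.len_eq, hlen]
    set q : Int := cur - ms.length with hqdef
    set tA : Int := if ((orig.length + ms.length : Nat) : Int) ≤ 1 + cur + (itv : Int)
        then ((orig.length + ms.length : Nat) : Int) else 1 + cur + (itv : Int) with htA
    have htmin : tA = min (1 + cur + (itv : Int)) ((orig.length : Int) + (ms.length : Int)) := by
      rw [htA]; split <;> [skip; skip] <;> push_cast <;> omega
    have hq0 : (0 : Int) ≤ q := by omega
    have hqn : q < (0 : Int) + orig.length := by omega
    have hins : PySem.List.insert (pvBmerge 0 orig ms) cur ("^" ++ PySem.Int.toStr tA) =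
        pvBmerge 0 orig (ms ++ [(q, "^" ++ PySem.Int.toStr tA)]) := by
      have hc : cur = ((cur.toNat : Nat) : Int) := by omega
      rw [hc, PySem.List.insert_natCast _ _ _ (by rw [hlen]; omega)]
      rw [pvBmerge_append_single 0 orig ms q _ hGood.1
        (fun p hp => ⟨(hGood.2 p hp).1, by have := hUb p hp; omega⟩) hq0 hqn]
      have : (q - (0:Nat)).toNat + ms.length = cur.toNat := by omega
      rw [this]
    rw [hins]
    -- B side: one marker peeled off
    have hB : pvBmarkers orig.length itv (m+1) cur ms.length =
        (q, "^" ++ PySem.Int.toStr tA) :: pvBmarkers orig.length itv m tA (ms.length + 1) := by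
      rw [pvBmarkers]; rw [htmin]
    rw [hB]
    have hassoc : ms ++ ((q, "^" ++ PySem.Int.toStr tA) :: pvBmarkers orig.length itv m tA (ms.length + 1)) =
        (ms ++ [(q, "^" ++ PySem.Int.toStr tA)]) ++ pvBmarkers orig.length itv m tA (ms.length + 1) := by
      simp
    rw [hassoc]
    have htge : cur + 1 ≤ tA := by rw [htmin]; omega
    have htle : tA ≤ (orig.length : Int) + ms.length := by rw [htmin]; omega
    have hlen' : ((ms ++ [(q, "^" ++ PySem.Int.toStr tA)]).length) = ms.length + 1 := by simp
    have := ih (ms ++ [(q, "^" ++ PySem.Int.toStr tA)]) tA ?_ ?_ ?_ ?_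
    · rw [hlen'] at this; exact this
    · constructor
      · simp only [List.map_append, List.map_cons, List.map_nil]
        refine List.pairwise_append.mpr ⟨hGood.1, by simp, ?_⟩
        intro a ha b hb
        simp at hb; subst hb
        have := hUb a ha; omega
      · intro p hp
        simp only [List.map_append, List.map_cons, List.map_nil, List.mem_append, List.mem_cons] at hp
        rcases hp with hp | hp
        · exact hGood.2 p hp
        · simp at hp; subst hp; constructor <;> push_cast <;> omega
    · intro p hp
      simp only [List.map_append, List.map_cons, List.map_nil, List.mem_append, List.mem_cons] at hp
      rw [hlen']
      rcases hp with hp | hp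
      · have := hUb p hp; push_cast; omega
      · simp at hp; subst hp; push_cast; omega
    · rw [hlen']; push_cast; omega
    · rw [hlen']; push_cast; omega

theorem pvBmerge_skip (k : Nat) (xs : List String) (j : Nat) (l : String)
    (ms : List (Int × String)) (hjk : j ≤ k) (hk : k < j + xs.length) :
    pvBmerge j xs (((k : Int), l) :: ms) =
      xs.take (k - j) ++ l :: pvBmerge k (xs.drop (k - j)) ms := by
  induction xs generalizing j with
  | nil => simp at hk; omega
  | cons x xs ih =>
    rcases eq_or_lt_of_le hjk with h' | h'
    · subst h'
      conv_lhs => rw [pvBmerge]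
      rw [if_pos rfl]
      simp
    · conv_lhs => rw [pvBmerge]
      rw [if_neg (by intro h; exact absurd (by exact_mod_cast h) (by omega : k ≠ j))]
      have h1 : k - j = (k - (j + 1)) + 1 := by omega
      rw [h1, List.take_succ_cons, List.drop_succ_cons, List.cons_append]
      rw [ih (j + 1) (by omega) (by simp at hk ⊢; omega)]

theorem pvBstitch_eq_merge (orig : List String) :
    ∀ (ms : List (Int × String)) (j : Nat) (out : List String),
    (∀ p ∈ ms.map Prod.fst, (j : Int) ≤ p ∧ p < orig.length) →
    (ms.map Prod.fst).Pairwise (· ≤ ·) →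
    pvBstitch orig ms out ((j : Nat) : Int) = out ++ pvBmerge j (orig.drop j) ms := by
  intro ms
  induction ms with
  | nil =>
    intro j out _ _
    rw [pvBstitch, PySem.List.slice_from_natCast, pvBmerge_nil]
  | cons hd ms ih =>
    obtain ⟨pos, label⟩ := hd
    intro j out hmem hsort
    have hj : ((j : Nat) : Int) ≤ pos := (hmem pos (by simp)).1
    have hn : pos < (orig.length : Int) := (hmem pos (by simp)).2
    have hk : pos = ((pos.toNat : Nat) : Int) := by omega
    simp only [List.map_cons, List.pairwise_cons] at hsort
    rw [pvBstitch, hk, ih pos.toNat _ ?_ hsort.2]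
    · rw [pvBmerge_skip pos.toNat (orig.drop j) j label ms (by omega)
        (by simp; omega)]
      rw [PySem.List.slice_natCast, List.drop_drop,
        show j + (pos.toNat - j) = pos.toNat by omega]
      simp
    · intro p hp
      have h1 := hsort.1 p hp
      have h2 := (hmem p (by simp [hp])).2
      exact ⟨by omega, h2⟩

theorem pvBmarkers_facts (n itv : Nat) :
    ∀ (m : Nat) (cur : Int) (i : Nat), (i : Int) ≤ cur → cur < (n : Int) + i →
    (((pvBmarkers n itv m cur i).map Prod.fst).Pairwise (· ≤ ·) ∧
      ∀ p ∈ (pvBmarkers n itv m cur i).map Prod.fst, cur - i ≤ p ∧ p < n) := by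
  intro m
  induction m with
  | zero => intro cur i _ _; simp [pvBmarkers]
  | succ m ih =>
    intro cur i hi hcur
    rw [pvBmarkers]
    set t : Int := min (1 + cur + (itv : Int)) ((n : Int) + (i : Int)) with ht
    have h1 : cur + 1 ≤ t := by rw [ht]; omega
    have h2 : t < (n : Int) + (i + 1) := by rw [ht]; omega
    have h3 : ((i + 1 : Nat) : Int) ≤ t := by push_cast; omega
    obtain ⟨ihs, ihb⟩ := ih t (i + 1) h3 h2
    refine ⟨?_, ?_⟩
    · simp only [List.map_cons]
      refine List.pairwise_cons.mpr ⟨?_, ihs⟩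
      intro p hp
      have := (ihb p hp).1
      push_cast at this ⊢; omega
    · intro p hp
      simp only [List.map_cons, List.mem_cons] at hp
      rcases hp with rfl | hp
      · constructor <;> omega
      · have := ihb p hp
        constructor
        · push_cast at this ⊢; omega
        · exact this.2

-- ===== VERDICT (by name: the statement is the Claim_ definition above) =====
theorem add_skip_pointers_spec : Claim_equal_add_skip_pointers := by
  unfold Claim_equal_add_skip_pointers
  intro l _ hpre
  unfold Spec_add_skip_pointers add_skip_pointers add_skip_pointers_alt
  have hn : 0 < l.length := List.length_pos_iff.mpr hpre
  have hA := pvLoop_eq (Nat.sqrt l.length) (l.length / Nat.sqrt l.length) l [] 0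
    ⟨by simp, by simp⟩ (by simp) (by simp) (by simpa using hn)
  rw [pvBmerge_nil] at hA
  obtain ⟨hsort, hb⟩ := pvBmarkers_facts l.length (l.length / Nat.sqrt l.length)
    (Nat.sqrt l.length) 0 0 (by simp) (by simpa using hn)
  have hB := pvBstitch_eq_merge l
    (pvBmarkers l.length (l.length / Nat.sqrt l.length) (Nat.sqrt l.length) 0 0) 0 []
    (fun p hp => ⟨by simpa using (hb p hp).1, by exact_mod_cast (hb p hp).2⟩) hsort
  simp only [Nat.cast_zero, List.nil_append, List.drop_zero] at hB
  simp only [List.nil_append] at hA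
  rw [hA, hB]
  simp
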